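-- pv_equiv track=rewrite | github.com/4111y80y/paddleocr | src/settings.py | check_hotkey_conflicts
-- ===== SOURCE A (Python) =====
-- def check_hotkey_conflicts(new_hotkeys: dict) -> list[tuple[str, str, str]]:
--     """
--     Check for conflicts among hotkeys.
--     Returns list of (hotkey1_name, hotkey2_name, hotkey_value) conflicts.
--     """
--     conflicts = []
--     seen = {}
--
--     for key_name, hotkey in new_hotkeys.items():
--         normalized = hotkey.strip().lower()
--         if normalized in seen:
--             conflicts.append((seen[normalized], key_name, normalized))
--         else:
--             seen[normalized] = key_name
--
--     return conflicts
-- ===== SOURCE B (Python) =====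
-- def check_hotkey_conflicts(new_hotkeys: dict) -> list[tuple[str, str, str]]:
--     """
--     Check for conflicts among hotkeys.
--     Returns list of (hotkey1_name, hotkey2_name, hotkey_value) conflicts.
--     """
--     items = list(new_hotkeys.items())
--     conflicts = []
--     for j, (key_name, hotkey) in enumerate(items):
--         normalized = hotkey.strip().lower()
--         for prev_name, prev_hotkey in items[:j]:
--             if prev_hotkey.strip().lower() == normalized:
--                 conflicts.append((prev_name, key_name, normalized))
--                 break
--     return conflicts
-- ===== Notes on version B (the rewrite author's own statement) =====
-- stated objective: alternative
-- what changed: A builds a 'seen' dict as it scans and reports against the stored first owner; B keeps no dict or state at all: for each item it brute-force rescans the earlier items (items[:j]) for the first one with the same normalized value and, if found, emits that pair.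
import Mathlib
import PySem

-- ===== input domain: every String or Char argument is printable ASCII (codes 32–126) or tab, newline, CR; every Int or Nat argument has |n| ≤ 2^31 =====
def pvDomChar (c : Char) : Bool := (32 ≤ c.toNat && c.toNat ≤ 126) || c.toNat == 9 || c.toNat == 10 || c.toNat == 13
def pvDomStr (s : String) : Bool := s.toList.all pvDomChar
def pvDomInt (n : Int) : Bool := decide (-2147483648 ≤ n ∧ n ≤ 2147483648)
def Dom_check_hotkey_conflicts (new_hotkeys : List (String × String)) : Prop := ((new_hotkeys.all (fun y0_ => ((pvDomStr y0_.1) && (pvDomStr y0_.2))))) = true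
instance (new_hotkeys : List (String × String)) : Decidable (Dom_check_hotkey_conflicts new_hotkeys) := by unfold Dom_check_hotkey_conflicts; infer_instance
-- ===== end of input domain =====

-- B replaces A's stateful seen-dict scan by a stateless quadratic rescan of the earlier items
-- (different algorithm, not faster; same return value).

-- hotkey.strip().lower()
def pvNorm (h : String) : String := PySem.Str.lower (PySem.Str.strip h)

-- ===== PORT A =====
-- one loop step of A: 'if normalized in seen: append (seen[normalized], key_name, normalized) else seen[normalized] = key_name'
-- ('in' + '[]' is one get? match)
def pvStepA (st : List (String × String × String) × PySem.Dict String String)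
    (q : String × String) : List (String × String × String) × PySem.Dict String String :=
  match st.2.get? q.2 with
  | some f => (st.1 ++ [(f, q.1, q.2)], st.2)
  | none => (st.1, st.2.insert q.2 q.1)

def check_hotkey_conflicts (new_hotkeys : List (String × String)) : List (String × String × String) :=
  (new_hotkeys.foldl (fun st p => pvStepA st (p.1, pvNorm p.2)) ([], PySem.Dict.empty)).1

-- ===== PORT B =====
-- 'for j, (key_name, hotkey) in enumerate(items): … for prev in items[:j]: if …: append; break'
-- (the inner for-with-break is the first match, i.e. find? over the slice)
def check_hotkey_conflicts_alt (new_hotkeys : List (String × String)) : List (String × String × String) :=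
  (PySem.List.enumerate new_hotkeys 0).foldl
    (fun conflicts jp =>
      let normalized := pvNorm jp.2.2
      match (PySem.List.slice new_hotkeys none (some jp.1)).find?
              (fun q => pvNorm q.2 == normalized) with
      | some prev => conflicts ++ [(prev.1, jp.2.1, normalized)]
      | none => conflicts) []

-- ===== PRECONDITION & SPEC =====
-- (no Pre_: A is total)
def Spec_check_hotkey_conflicts (new_hotkeys : List (String × String)) (out : List (String × String × String)) : Prop := out = check_hotkey_conflicts_alt new_hotkeys
instance (new_hotkeys : List (String × String)) (out : List (String × String × String)) : Decidable (Spec_check_hotkey_conflicts new_hotkeys out) := by unfold Spec_check_hotkey_conflicts; infer_instance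

-- ===== CLAIM =====
def Claim_equal_check_hotkey_conflicts : Prop := ∀ (new_hotkeys : List (String × String)), Dom_check_hotkey_conflicts new_hotkeys → Spec_check_hotkey_conflicts new_hotkeys (check_hotkey_conflicts new_hotkeys)

-- ===== LEMMAS AND PROOFS =====

-- invariant: after scanning a prefix 'pre' of the input, A's 'seen' maps each normalized value n
-- to the name of n's first occurrence in 'pre'; B's step at index j = pre.length looks up exactly
-- that first occurrence by find? over xs.take j = pre.
theorem pv_loop_eq (xs : List (String × String)) :
    ∀ (rest pre : List (String × String)) (acc : List (String × String × String))
      (seen : PySem.Dict String String),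
      xs = pre ++ rest →
      (∀ n, seen.get? n = (pre.find? (fun q => pvNorm q.2 == n)).map (·.1)) →
      (rest.foldl (fun st p => pvStepA st (p.1, pvNorm p.2)) (acc, seen)).1
        = (PySem.List.enumerate rest (pre.length : Int)).foldl
            (fun conflicts jp =>
              match (PySem.List.slice xs none (some jp.1)).find?
                      (fun q => pvNorm q.2 == pvNorm jp.2.2) with
              | some prev => conflicts ++ [(prev.1, jp.2.1, pvNorm jp.2.2)]
              | none => conflicts) acc := by
  intro rest
  induction rest with
  | nil => intro pre acc seen _ _; simp [PySem.List.enumerate_nil]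
  | cons p t ih =>
    intro pre acc seen hsplit hseen
    have hslice : PySem.List.slice xs none (some (pre.length : Int)) = pre := by
      rw [PySem.List.slice_to_natCast, hsplit, List.take_append_of_le_length (le_refl _)]
      simp
    rw [PySem.List.enumerate_cons, List.foldl_cons, List.foldl_cons]
    cases hf : pre.find? (fun q => pvNorm q.2 == pvNorm p.2) with
    | some prev =>
      have hstepA : pvStepA (acc, seen) (p.1, pvNorm p.2)
          = (acc ++ [(prev.1, p.1, pvNorm p.2)], seen) := by
        simp [pvStepA, hseen, hf]
      rw [hstepA]
      simp only [hslice, hf]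
      have : ((pre.length : Int) + 1) = (((pre ++ [p]).length : Int)) := by simp
      rw [this]
      rw [ih (pre ++ [p]) (acc ++ [(prev.1, p.1, pvNorm p.2)]) seen (by simpa using hsplit) ?_]
      intro n
      rw [hseen n, List.find?_append]
      by_cases hn : pvNorm p.2 = n
      · subst hn; rw [hf]; rfl
      · simp [show (pvNorm p.2 == n) = false from by simpa using hn]
    | none =>
      have hstepA : pvStepA (acc, seen) (p.1, pvNorm p.2)
          = (acc, seen.insert (pvNorm p.2) p.1) := by
        simp [pvStepA, hseen, hf]
      rw [hstepA]
      simp only [hslice, hf]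
      have : ((pre.length : Int) + 1) = (((pre ++ [p]).length : Int)) := by simp
      rw [this]
      rw [ih (pre ++ [p]) acc (seen.insert (pvNorm p.2) p.1) (by simpa using hsplit) ?_]
      intro n
      rw [List.find?_append]
      by_cases hn : n = pvNorm p.2
      · subst hn
        rw [PySem.Dict.get?_insert_self, hf]
        simp
      · rw [PySem.Dict.get?_insert_of_ne _ _ hn, hseen n]
        have h1 : ([p].find? (fun q => pvNorm q.2 == n)) = none := by
          simp [show (pvNorm p.2 == n) = false from by simpa using (Ne.symm hn)]
        rw [h1]
        cases pre.find? (fun q => pvNorm q.2 == n) <;> rfl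

-- ===== VERDICT =====
theorem check_hotkey_conflicts_spec : Claim_equal_check_hotkey_conflicts := by
  intro xs _
  unfold Spec_check_hotkey_conflicts check_hotkey_conflicts check_hotkey_conflicts_alt
  have := pv_loop_eq xs xs [] [] PySem.Dict.empty (by simp) (by simp [PySem.Dict.get?_empty])
  simpa using this
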